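-- pv_equiv track=rewrite | github.com/sinoz/python-exercises | src/procedural/figures/IsoscelesTriangle.py | iso_triangle
-- ===== SOURCE A (Python) =====
-- def iso_triangle(figure, amount_rows):
--     output = ""
--     figure_record = ""
--
--     # we start at 1 as we have only one asterisk at the top
--     offset = 1
--     destination = (amount_rows + 1)
--
--     for row in range(offset, destination):
--         # calculate the amount of spaces to include from the left side based on the current row
--         amt_spaces = (amount_rows - row)
--         for col in range(amt_spaces):
--             output += " "
--
--         # Adds two figures to the output for every row that comes after the first (top to bottom)
--         output += figure_record + figure_record + figure
--         figure_record += figure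
--
--         output += "\n"
--
--     return output
-- ===== SOURCE B (Python) =====
-- def iso_triangle(figure, amount_rows):
--     return "".join(
--         " " * (amount_rows - row) + figure * (2 * row - 1) + "\n"
--         for row in range(1, amount_rows + 1)
--     )
-- ===== Notes on version B (the rewrite author's own statement) =====
-- stated objective: simpler
-- what changed: Replaced the two-accumulator loop (running output string plus growing figure_record, with an inner character-by-character spaces loop) by a per-row closed form: each row is " "*(n-row) + figure*(2*row-1) + "\n", joined over range(1, n+1).
import Mathlib
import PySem

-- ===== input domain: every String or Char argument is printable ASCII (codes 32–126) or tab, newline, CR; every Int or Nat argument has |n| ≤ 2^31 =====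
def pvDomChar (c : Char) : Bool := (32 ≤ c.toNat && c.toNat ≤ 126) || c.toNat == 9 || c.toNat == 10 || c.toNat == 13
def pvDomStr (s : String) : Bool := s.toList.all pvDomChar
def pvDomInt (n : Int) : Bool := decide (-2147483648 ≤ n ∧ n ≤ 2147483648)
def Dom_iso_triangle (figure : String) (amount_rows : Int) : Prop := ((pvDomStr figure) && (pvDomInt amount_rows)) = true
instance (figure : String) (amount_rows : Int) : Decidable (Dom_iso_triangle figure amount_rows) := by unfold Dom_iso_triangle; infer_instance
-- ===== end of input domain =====

-- B drops A's running 'figure_record' accumulator and inner spaces loop: each row is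
-- computed directly as " "*(n-row) + figure*(2*row-1) + "\n" and the rows are joined (objective: simpler).

-- ===== PORT A =====
def iso_triangle (figure : String) (amount_rows : Int) : String :=
  let offset : Int := 1
  let destination : Int := amount_rows + 1
  ((PySem.List.pyRange offset destination 1).foldl
    (fun (st : String × String) row =>
      let amt_spaces := amount_rows - row
      let output := (PySem.List.pyRange 0 amt_spaces 1).foldl (fun o _ => o ++ " ") st.1
      let output := output ++ st.2 ++ st.2 ++ figure
      let figure_record := st.2 ++ figure
      let output := output ++ "\n"
      (output, figure_record))
    ("", "")).1

-- ===== PORT B =====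
def iso_triangle_alt (figure : String) (amount_rows : Int) : String :=
  PySem.Str.join ""
    ((PySem.List.pyRange 1 (amount_rows + 1) 1).map (fun row =>
      String.ofList (PySem.List.pyRepeat " ".toList (amount_rows - row)) ++
      String.ofList (PySem.List.pyRepeat figure.toList (2 * row - 1)) ++ "\n"))

-- ===== PRECONDITION & SPEC =====
def Spec_iso_triangle (figure : String) (amount_rows : Int) (out : String) : Prop := out = iso_triangle_alt figure amount_rows
instance (figure : String) (amount_rows : Int) (out : String) : Decidable (Spec_iso_triangle figure amount_rows out) := by unfold Spec_iso_triangle; infer_instance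

-- ===== CLAIM (what is proved, stated in full; the proofs are below) =====
def Claim_equal_iso_triangle : Prop := ∀ (figure : String) (amount_rows : Int), Dom_iso_triangle figure amount_rows → Spec_iso_triangle figure amount_rows (iso_triangle figure amount_rows)

-- ===== LEMMAS AND PROOFS =====

-- one character-level row: spaces, then 2*row-1 copies of the figure, then a newline
def pvRowL (f : List Char) (n row : Int) : List Char :=
  List.replicate (n - row).toNat ' ' ++ PySem.List.pyRepeat f (2 * row - 1) ++ ['\n']

-- the first m rows, character level
def pvTriL (f : List Char) (n : Int) (m : Nat) : List Char :=
  ((List.range m).map (fun k => pvRowL f n ((k : Int) + 1))).flatten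

theorem pvRepeat_succ {α : Type} (xs : List α) (k : Nat) :
    PySem.List.pyRepeat xs ((k : Int) + 1) = PySem.List.pyRepeat xs (k : Int) ++ xs := by
  have h : ((k : Int) + 1).toNat = k + 1 := by omega
  simp [PySem.List.pyRepeat, h, List.replicate_succ', List.flatten_append]

theorem pvRepeat_two_add_one {α : Type} (xs : List α) (m : Nat) :
    PySem.List.pyRepeat xs (m : Int) ++ PySem.List.pyRepeat xs (m : Int) ++ xs
      = PySem.List.pyRepeat xs (2 * ((m : Int) + 1) - 1) := by
  have h : (2 * ((m : Int) + 1) - 1).toNat = m + (m + 1) := by omega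
  simp [PySem.List.pyRepeat, h, List.replicate_add, List.replicate_succ', List.flatten_append]

theorem pvSpacesFold (l : List Int) (s : String) :
    ((l.foldl (fun o _ => o ++ " ") s)).toList = s.toList ++ List.replicate l.length ' ' := by
  induction l generalizing s with
  | nil => simp
  | cons x xs ih => simp [List.foldl, ih, List.replicate_succ]

theorem pvJoinEmpty (l : List (List Char)) : PySem.Chars.join [] l = l.flatten := by
  induction l with
  | nil => simp [PySem.Chars.join, List.intercalate]
  | cons a t ih =>
    cases t with
    | nil => simp [PySem.Chars.join, List.intercalate]
    | cons b t' =>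
      simp only [PySem.Chars.join, List.intercalate] at *
      simp [List.intersperse, List.flatten] at *
      simpa using ih

theorem pvTriL_succ (f : List Char) (n : Int) (m : Nat) :
    pvTriL f n (m + 1) = pvTriL f n m ++ pvRowL f n ((m : Int) + 1) := by
  simp [pvTriL, List.range_succ]

theorem pvRowStep (f : List Char) (n : Int) (m : Nat) :
    List.replicate (n - ((m : Int) + 1) - 0).toNat ' ' ++ PySem.List.pyRepeat f (m : Int)
      ++ PySem.List.pyRepeat f (m : Int) ++ f ++ ("\n" : String).toList
      = pvRowL f n ((m : Int) + 1) := by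
  rw [pvRowL, ← pvRepeat_two_add_one]
  simp [List.append_assoc]

theorem pvAinv (figure : String) (n : Int) (m : Nat) :
    ((PySem.List.pyRange 1 ((m : Int) + 1) 1).foldl
      (fun (st : String × String) row =>
        let amt_spaces := n - row
        let output := (PySem.List.pyRange 0 amt_spaces 1).foldl (fun o _ => o ++ " ") st.1
        let output := output ++ st.2 ++ st.2 ++ figure
        let figure_record := st.2 ++ figure
        let output := output ++ "\n"
        (output, figure_record))
      ("", "")).1.toList = pvTriL figure.toList n m
    ∧ ((PySem.List.pyRange 1 ((m : Int) + 1) 1).foldl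
      (fun (st : String × String) row =>
        let amt_spaces := n - row
        let output := (PySem.List.pyRange 0 amt_spaces 1).foldl (fun o _ => o ++ " ") st.1
        let output := output ++ st.2 ++ st.2 ++ figure
        let figure_record := st.2 ++ figure
        let output := output ++ "\n"
        (output, figure_record))
      ("", "")).2.toList = PySem.List.pyRepeat figure.toList (m : Int) := by
  induction m with
  | zero =>
    rw [PySem.List.pyRange_one_eq_nil (by omega)]
    simp [pvTriL, PySem.List.pyRepeat]
  | succ m ih =>
    obtain ⟨h1, h2⟩ := ih
    have hcast : (((m + 1 : Nat) : Int)) + 1 = ((m : Int) + 1) + 1 := by push_cast; ring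
    have hsplit : PySem.List.pyRange 1 (((m + 1 : Nat) : Int) + 1) 1
        = PySem.List.pyRange 1 ((m : Int) + 1) 1 ++ [(m : Int) + 1] := by
      rw [hcast]
      exact PySem.List.pyRange_one_succ_right (by omega)
    rw [hsplit, List.foldl_append]
    constructor
    · simp only [List.foldl]
      rw [pvTriL_succ, ← pvRowStep]
      simp only [String.toList_append, pvSpacesFold, PySem.List.length_pyRange_one, h1, h2]
      simp [List.append_assoc]
    · simp only [List.foldl]
      simp only [String.toList_append, h2]
      have : ((m + 1 : Nat) : Int) = (m : Int) + 1 := by push_cast; ring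
      rw [this, pvRepeat_succ]

theorem pvAltAux (figure : String) (n : Int) (m : Nat) :
    ((PySem.List.pyRange 1 ((m : Int) + 1) 1).map (fun row =>
      (String.ofList (PySem.List.pyRepeat " ".toList (n - row)) ++
       String.ofList (PySem.List.pyRepeat figure.toList (2 * row - 1)) ++ "\n").toList)).flatten
      = pvTriL figure.toList n m := by
  induction m with
  | zero =>
    rw [PySem.List.pyRange_one_eq_nil (by omega)]
    simp [pvTriL]
  | succ m ih =>
    have hcast : (((m + 1 : Nat) : Int)) + 1 = ((m : Int) + 1) + 1 := by push_cast; ring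
    have hsplit : PySem.List.pyRange 1 (((m + 1 : Nat) : Int) + 1) 1
        = PySem.List.pyRange 1 ((m : Int) + 1) 1 ++ [(m : Int) + 1] := by
      rw [hcast]
      exact PySem.List.pyRange_one_succ_right (by omega)
    rw [hsplit, List.map_append, List.flatten_append, ih, pvTriL_succ]
    simp [pvRowL, PySem.List.pyRepeat, List.flatten_replicate_singleton,
      show (" " : String).toList = [' '] from rfl, List.append_assoc]

theorem pvAltToList (figure : String) (n : Int) :
    (iso_triangle_alt figure n).toList = pvTriL figure.toList n n.toNat := by
  rw [iso_triangle_alt, PySem.Str.toList_join,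
    show ("" : String).toList = [] from rfl, pvJoinEmpty, List.map_map]
  by_cases hn : 0 ≤ n
  · rw [show n + 1 = ((n.toNat : Int)) + 1 from by omega]
    exact pvAltAux figure n n.toNat
  · rw [PySem.List.pyRange_one_eq_nil (by omega)]
    simp [show n.toNat = 0 from by omega, pvTriL]

theorem pvAToList (figure : String) (n : Int) :
    (iso_triangle figure n).toList = pvTriL figure.toList n n.toNat := by
  rw [iso_triangle]
  by_cases hn : 0 ≤ n
  · have h : n + 1 = ((n.toNat : Int)) + 1 := by omega
    rw [h]
    exact (pvAinv figure n n.toNat).1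
  · have h0 : n.toNat = 0 := by omega
    rw [PySem.List.pyRange_one_eq_nil (by omega)]
    simp [h0, pvTriL]

-- ===== VERDICT (by name: the statement is the Claim_ definition above) =====
theorem iso_triangle_spec : Claim_equal_iso_triangle := by
  intro figure amount_rows _
  unfold Spec_iso_triangle
  apply String.toList_inj.mp
  rw [pvAToList, pvAltToList]
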